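-- pv_equiv track=rewrite | github.com/Mushinako/Google-Code-Jam-2020 | 02-1A/01-Pattern Matching/solution-PPP.py | pattern_matching
-- ===== SOURCE A (Python) =====
-- def pattern_matching(patterns):
--     first_arr = sorted(p[0] for p in patterns)
--     first = ''
--     for f in first_arr:
--         if len(first) < len(f) and (first == f[: len(first)] or not first):
--             first = f
--             continue
--         if len(first) >= len(f) and (first[: len(f)] == f or not f):
--             continue
--         return '*'
--     last_arr = sorted(p[-1] for p in patterns)
--     last = ''
--     for l in last_arr:
--         if len(last) < len(l) and (last == l[-len(last):] or not last):
--             last = l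
--             continue
--         if len(last) >= len(l) and (last[-len(l):] == l or not l):
--             continue
--         return '*'
--     middle = ''.join(''.join(p[1:-1]) for p in patterns)
--     return first + middle + last
-- ===== SOURCE B (Python) =====
-- def pattern_matching(patterns):
--     firsts = [p[0] for p in patterns]
--     first = max(firsts, key=len, default='')
--     if not all(map(first.startswith, firsts)):
--         return '*'
--     lasts = [p[-1] for p in patterns]
--     last = max(lasts, key=len, default='')
--     if not all(map(last.endswith, lasts)):
--         return '*'
--     middle = ''.join([s for p in patterns for s in p[1:-1]])
--     return first + middle + last
-- ===== Notes on version B (the rewrite author's own statement) =====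
-- stated objective: alternative
-- what changed: B drops both sorts and the running-chain scans: it picks the longest first/last segment with max(key=len) and verifies every other segment is a prefix/suffix of it in one linear pass (valid because prefixes/suffixes of a common string are mutually comparable).
import Mathlib
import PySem

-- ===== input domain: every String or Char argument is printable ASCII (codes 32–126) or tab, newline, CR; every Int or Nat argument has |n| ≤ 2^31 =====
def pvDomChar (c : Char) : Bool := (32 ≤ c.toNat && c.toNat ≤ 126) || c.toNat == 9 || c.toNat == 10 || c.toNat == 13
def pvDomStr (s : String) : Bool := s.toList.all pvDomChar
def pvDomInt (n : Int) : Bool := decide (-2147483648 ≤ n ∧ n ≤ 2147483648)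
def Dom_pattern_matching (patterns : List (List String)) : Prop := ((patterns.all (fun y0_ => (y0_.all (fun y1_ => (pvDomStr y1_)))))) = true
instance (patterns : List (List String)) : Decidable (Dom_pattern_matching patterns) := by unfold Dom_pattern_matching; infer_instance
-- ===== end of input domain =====

-- B replaces A's two sort-then-chain-scan passes by picking the longest first/last segment and
-- checking the others are its prefixes/suffixes in one linear pass (objective: alternative, sort-free).


-- ===== PORT A =====
-- the 'for f in first_arr' loop: none = the 'return "*"' path
def pvLoopFirst : List String → String → Option String
  | [], first => some first
  | f :: fs, first =>
    if PySem.Str.len first < PySem.Str.len f ∧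
        (first = PySem.Str.slice f none (some (PySem.Str.len first)) ∨ first = "") then
      pvLoopFirst fs f
    else if PySem.Str.len f ≤ PySem.Str.len first ∧
        (PySem.Str.slice first none (some (PySem.Str.len f)) = f ∨ f = "") then
      pvLoopFirst fs first
    else none

-- the 'for l in last_arr' loop (negative-index slices), none = 'return "*"'
def pvLoopLast : List String → String → Option String
  | [], last => some last
  | l :: ls, last =>
    if PySem.Str.len last < PySem.Str.len l ∧
        (last = PySem.Str.slice l (some (-(PySem.Str.len last))) none ∨ last = "") then
      pvLoopLast ls l
    else if PySem.Str.len l ≤ PySem.Str.len last ∧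
        (PySem.Str.slice last (some (-(PySem.Str.len l))) none = l ∨ l = "") then
      pvLoopLast ls last
    else none

def pattern_matching (patterns : List (List String)) : String :=
  let first_arr := PySem.List.sorted (patterns.map (fun p => PySem.List.pyGetD p 0 "")) (fun x => x)
  match pvLoopFirst first_arr "" with
  | none => "*"
  | some first =>
    let last_arr := PySem.List.sorted (patterns.map (fun p => PySem.List.pyGetD p (-1) "")) (fun x => x)
    match pvLoopLast last_arr "" with
    | none => "*"
    | some last =>
      let middle := PySem.Str.join "" (patterns.map (fun p => PySem.Str.join "" (PySem.List.slice p (some 1) (some (-1)))))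
      first ++ middle ++ last

-- ===== PORT B =====
def pattern_matching_alt (patterns : List (List String)) : String :=
  let firsts := patterns.map (fun p => PySem.List.pyGetD p 0 "")
  let first := PySem.List.maxD firsts PySem.Str.len ""
  if ¬ (firsts.all (fun f => PySem.Str.startswith first f)) then "*"
  else
    let lasts := patterns.map (fun p => PySem.List.pyGetD p (-1) "")
    let last := PySem.List.maxD lasts PySem.Str.len ""
    if ¬ (lasts.all (fun l => PySem.Str.endswith last l)) then "*"
    else
      let middle := PySem.Str.join "" (patterns.flatMap (fun p => PySem.List.slice p (some 1) (some (-1))))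
      first ++ middle ++ last

-- ===== PRECONDITION & SPEC =====
-- Pre_ excludes exactly the inputs where some pattern is the empty list: there 'p[0]' raises IndexError in A.
def Pre_pattern_matching (patterns : List (List String)) : Prop := ∀ p ∈ patterns, p ≠ []
instance (patterns : List (List String)) : Decidable (Pre_pattern_matching patterns) := by unfold Pre_pattern_matching; infer_instance
def pvWitness_pattern_matching : List (List String) := [["a", "x", "bc"], ["abc"], ["ab", "c"]]
def Spec_pattern_matching (patterns : List (List String)) (out : String) : Prop := out = pattern_matching_alt patterns
instance (patterns : List (List String)) (out : String) : Decidable (Spec_pattern_matching patterns out) := by unfold Spec_pattern_matching; infer_instance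

-- ===== CLAIM (what is proved, stated in full; the proofs are below) =====
def Claim_equal_pattern_matching : Prop := ∀ (patterns : List (List String)), Dom_pattern_matching patterns → Pre_pattern_matching patterns → Spec_pattern_matching patterns (pattern_matching patterns)

-- ===== LEMMAS AND PROOFS =====

-- '' is a prefix/suffix of everything, so A's loop conditions reduce to plain prefix/suffix facts.
lemma pvCondFirst1 (first f : String) :
    (PySem.Str.len first < PySem.Str.len f ∧
      (first = PySem.Str.slice f none (some (PySem.Str.len first)) ∨ first = "")) ↔
    (first.toList.length < f.toList.length ∧ first.toList <+: f.toList) := by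
  constructor
  · rintro ⟨hlt, hc⟩
    have hlt' : first.toList.length < f.toList.length := by
      simpa [PySem.Str.len_eq] using hlt
    refine ⟨hlt', ?_⟩
    rcases hc with hc | hc
    · have h : first.toList = (PySem.Str.slice f none (some (PySem.Str.len first))).toList := by
        rw [← hc]
      rw [PySem.Str.toList_slice, PySem.Chars.slice_eq_listSlice, PySem.Str.len_eq,
          PySem.List.slice_to_natCast] at h
      exact List.prefix_iff_eq_take.mpr h
    · subst hc; simp
  · rintro ⟨hlt, hp⟩
    refine ⟨by simpa [PySem.Str.len_eq] using hlt, Or.inl ?_⟩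
    apply String.toList_inj.mp
    rw [PySem.Str.toList_slice, PySem.Chars.slice_eq_listSlice, PySem.Str.len_eq,
        PySem.List.slice_to_natCast]
    exact List.prefix_iff_eq_take.mp hp

lemma pvCondFirst2 (first f : String) :
    (PySem.Str.len f ≤ PySem.Str.len first ∧
      (PySem.Str.slice first none (some (PySem.Str.len f)) = f ∨ f = "")) ↔
    (f.toList.length ≤ first.toList.length ∧ f.toList <+: first.toList) := by
  constructor
  · rintro ⟨hle, hc⟩
    have hle' : f.toList.length ≤ first.toList.length := by
      simpa [PySem.Str.len_eq] using hle
    refine ⟨hle', ?_⟩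
    rcases hc with hc | hc
    · have h : f.toList = (PySem.Str.slice first none (some (PySem.Str.len f))).toList := by
        rw [hc]
      rw [PySem.Str.toList_slice, PySem.Chars.slice_eq_listSlice, PySem.Str.len_eq,
          PySem.List.slice_to_natCast] at h
      exact List.prefix_iff_eq_take.mpr h
    · subst hc; simp
  · rintro ⟨hle, hp⟩
    refine ⟨by simpa [PySem.Str.len_eq] using hle, Or.inl ?_⟩
    apply String.toList_inj.mp
    rw [PySem.Str.toList_slice, PySem.Chars.slice_eq_listSlice, PySem.Str.len_eq,
        PySem.List.slice_to_natCast]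
    exact (List.prefix_iff_eq_take.mp hp).symm

lemma pvCondLast1 (last l : String) :
    (PySem.Str.len last < PySem.Str.len l ∧
      (last = PySem.Str.slice l (some (-(PySem.Str.len last))) none ∨ last = "")) ↔
    (last.toList.length < l.toList.length ∧ last.toList <:+ l.toList) := by
  constructor
  · rintro ⟨hlt, hc⟩
    have hlt' : last.toList.length < l.toList.length := by
      simpa [PySem.Str.len_eq] using hlt
    refine ⟨hlt', ?_⟩
    rcases hc with hc | hc
    · by_cases h0 : last.toList.length = 0
      · have h : last.toList = [] := List.length_eq_zero_iff.mp h0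
        simp [h]
      · have hk : 0 < last.toList.length := Nat.pos_of_ne_zero h0
        have h : last.toList = (PySem.Str.slice l (some (-(PySem.Str.len last))) none).toList := by
          rw [← hc]
        rw [PySem.Str.toList_slice, PySem.Chars.slice_eq_listSlice, PySem.Str.len_eq,
            PySem.List.slice_from_neg_natCast _ _ hk] at h
        exact List.suffix_iff_eq_drop.mpr h
    · subst hc; simp
  · rintro ⟨hlt, hs⟩
    refine ⟨by simpa [PySem.Str.len_eq] using hlt, ?_⟩
    by_cases h0 : last = ""
    · exact Or.inr h0
    · refine Or.inl ?_
      have hk : 0 < last.toList.length := by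
        rcases Nat.eq_zero_or_pos last.toList.length with h | h
        · exact absurd (String.toList_inj.mp (by simpa using List.length_eq_zero_iff.mp h)) h0
        · exact h
      apply String.toList_inj.mp
      rw [PySem.Str.toList_slice, PySem.Chars.slice_eq_listSlice, PySem.Str.len_eq,
          PySem.List.slice_from_neg_natCast _ _ hk]
      exact List.suffix_iff_eq_drop.mp hs

lemma pvCondLast2 (last l : String) :
    (PySem.Str.len l ≤ PySem.Str.len last ∧
      (PySem.Str.slice last (some (-(PySem.Str.len l))) none = l ∨ l = "")) ↔
    (l.toList.length ≤ last.toList.length ∧ l.toList <:+ last.toList) := by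
  constructor
  · rintro ⟨hle, hc⟩
    have hle' : l.toList.length ≤ last.toList.length := by
      simpa [PySem.Str.len_eq] using hle
    refine ⟨hle', ?_⟩
    rcases hc with hc | hc
    · by_cases h0 : l.toList.length = 0
      · have h : l.toList = [] := List.length_eq_zero_iff.mp h0
        simp [h]
      · have hk : 0 < l.toList.length := Nat.pos_of_ne_zero h0
        have h : l.toList = (PySem.Str.slice last (some (-(PySem.Str.len l))) none).toList := by
          rw [hc]
        rw [PySem.Str.toList_slice, PySem.Chars.slice_eq_listSlice, PySem.Str.len_eq,
            PySem.List.slice_from_neg_natCast _ _ hk] at h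
        exact List.suffix_iff_eq_drop.mpr h
    · subst hc; simp
  · rintro ⟨hle, hs⟩
    refine ⟨by simpa [PySem.Str.len_eq] using hle, ?_⟩
    by_cases h0 : l = ""
    · exact Or.inr h0
    · refine Or.inl ?_
      have hk : 0 < l.toList.length := by
        rcases Nat.eq_zero_or_pos l.toList.length with h | h
        · exact absurd (String.toList_inj.mp (by simpa using List.length_eq_zero_iff.mp h)) h0
        · exact h
      apply String.toList_inj.mp
      rw [PySem.Str.toList_slice, PySem.Chars.slice_eq_listSlice, PySem.Str.len_eq,
          PySem.List.slice_from_neg_natCast _ _ hk]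
      exact (List.suffix_iff_eq_drop.mp hs).symm

-- transferring an incomparable pair when the loop drops d for the longer k (d embeds in k)
lemma pvPairTransfer (R : List Char → List Char → Prop)
    (htrans : ∀ {x y z : List Char}, R x y → R y z → R x z)
    (hcmp : ∀ {x y z : List Char}, R x z → R y z → R x y ∨ R y x)
    {d k : String} {L M : List String}
    (hLM : ∀ x ∈ L, x = d ∨ x ∈ M) (hk : k ∈ M) (hdk : R d.toList k.toList)
    (h : ∃ a ∈ L, ∃ b ∈ L, ¬ R a.toList b.toList ∧ ¬ R b.toList a.toList) :
    ∃ a ∈ M, ∃ b ∈ M, ¬ R a.toList b.toList ∧ ¬ R b.toList a.toList := by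
  obtain ⟨a, ha, b, hb, hab, hba⟩ := h
  rcases hLM a ha with rfl | ha'
  · rcases hLM b hb with rfl | hb'
    · exact absurd (by rcases hcmp hdk hdk with h' | h' <;> exact h') hab
    · refine ⟨k, hk, b, hb', fun h' => hab (htrans hdk h'), fun h' => ?_⟩
      rcases hcmp hdk h' with h'' | h''
      · exact hab h''
      · exact hba h''
  · rcases hLM b hb with rfl | hb'
    · refine ⟨a, ha', k, hk, fun h' => ?_, fun h' => hba (htrans hdk h')⟩
      rcases hcmp h' hdk with h'' | h''
      · exact hab h''
      · exact hba h''
    · exact ⟨a, ha', b, hb', hab, hba⟩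

-- success: if every element (and cur) is a prefix of L, and L is among them, the loop returns L
lemma pvLoopFirst_success (l : List String) : ∀ (cur L : String),
    (∀ x ∈ cur :: l, x.toList <+: L.toList) → L ∈ cur :: l →
    pvLoopFirst l cur = some L := by
  induction l with
  | nil =>
    intro cur L _ hmem
    have : L = cur := by simpa using hmem
    subst this; rfl
  | cons f fs ih =>
    intro cur L hall hmem
    have hcurL := hall cur (List.mem_cons_self ..)
    have hfL := hall f (List.mem_cons_of_mem _ (List.mem_cons_self ..))
    have hcomp := List.prefix_or_prefix_of_prefix hcurL hfL
    simp only [pvLoopFirst]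
    split_ifs with h1 h2
    · rw [pvCondFirst1] at h1
      apply ih f L
      · intro x hx; exact hall x (List.mem_cons_of_mem _ hx)
      · rcases List.mem_cons.mp hmem with rfl | h
        · exact absurd hfL.length_le (by omega)
        · exact h
    · rw [pvCondFirst2] at h2
      apply ih cur L
      · intro x hx
        rcases List.mem_cons.mp hx with rfl | hx'
        · exact hcurL
        · exact hall x (List.mem_cons_of_mem _ (List.mem_cons_of_mem _ hx'))
      · rcases List.mem_cons.mp hmem with rfl | h
        · exact List.mem_cons_self ..
        · rcases List.mem_cons.mp h with rfl | h'
          · have : cur.toList = L.toList := hcurL.eq_of_length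
              (le_antisymm hcurL.length_le h2.1)
            rw [String.toList_inj.mp this]
            exact List.mem_cons_self ..
          · exact List.mem_cons_of_mem _ h'
    · exfalso
      rw [pvCondFirst1] at h1
      rw [pvCondFirst2] at h2
      rcases hcomp with h | h
      · have := h.length_le
        by_cases hlt : cur.toList.length < f.toList.length
        · exact h1 ⟨hlt, h⟩
        · have heq : cur.toList = f.toList := h.eq_of_length (by omega)
          exact h2 ⟨by omega, heq ▸ List.prefix_refl _⟩
      · exact h2 ⟨h.length_le, h⟩

-- failure: an incomparable pair makes the loop return none
lemma pvLoopFirst_failure (l : List String) : ∀ (cur : String),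
    (∃ a ∈ cur :: l, ∃ b ∈ cur :: l, ¬ a.toList <+: b.toList ∧ ¬ b.toList <+: a.toList) →
    pvLoopFirst l cur = none := by
  induction l with
  | nil =>
    rintro cur ⟨a, ha, b, hb, hab, _⟩
    have ha' : a = cur := by simpa using ha
    have hb' : b = cur := by simpa using hb
    subst ha'; subst hb'
    exact absurd (List.prefix_refl _) hab
  | cons f fs ih =>
    intro cur hpair
    simp only [pvLoopFirst]
    split_ifs with h1 h2
    · rw [pvCondFirst1] at h1
      apply ih f
      apply pvPairTransfer (fun x y => x <+: y) (fun hxy hyz => hxy.trans hyz)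
          (fun hxz hyz => List.prefix_or_prefix_of_prefix hxz hyz)
          (d := cur) (k := f) ?_ (List.mem_cons_self ..) h1.2 hpair
      intro x hx
      rcases List.mem_cons.mp hx with rfl | hx'
      · exact Or.inl rfl
      · exact Or.inr hx'
    · rw [pvCondFirst2] at h2
      apply ih cur
      apply pvPairTransfer (fun x y => x <+: y) (fun hxy hyz => hxy.trans hyz)
          (fun hxz hyz => List.prefix_or_prefix_of_prefix hxz hyz)
          (d := f) (k := cur) ?_ (List.mem_cons_self ..) h2.2 hpair
      intro x hx
      rcases List.mem_cons.mp hx with rfl | hx'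
      · exact Or.inr (List.mem_cons_self ..)
      · rcases List.mem_cons.mp hx' with rfl | hx''
        · exact Or.inl rfl
        · exact Or.inr (List.mem_cons_of_mem _ hx'')
    · rfl

lemma pvLoopLast_success (l : List String) : ∀ (cur L : String),
    (∀ x ∈ cur :: l, x.toList <:+ L.toList) → L ∈ cur :: l →
    pvLoopLast l cur = some L := by
  induction l with
  | nil =>
    intro cur L _ hmem
    have : L = cur := by simpa using hmem
    subst this; rfl
  | cons f fs ih =>
    intro cur L hall hmem
    have hcurL := hall cur (List.mem_cons_self ..)
    have hfL := hall f (List.mem_cons_of_mem _ (List.mem_cons_self ..))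
    have hcomp := List.suffix_or_suffix_of_suffix hcurL hfL
    simp only [pvLoopLast]
    split_ifs with h1 h2
    · rw [pvCondLast1] at h1
      apply ih f L
      · intro x hx; exact hall x (List.mem_cons_of_mem _ hx)
      · rcases List.mem_cons.mp hmem with rfl | h
        · exact absurd hfL.length_le (by omega)
        · exact h
    · rw [pvCondLast2] at h2
      apply ih cur L
      · intro x hx
        rcases List.mem_cons.mp hx with rfl | hx'
        · exact hcurL
        · exact hall x (List.mem_cons_of_mem _ (List.mem_cons_of_mem _ hx'))
      · rcases List.mem_cons.mp hmem with rfl | h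
        · exact List.mem_cons_self ..
        · rcases List.mem_cons.mp h with rfl | h'
          · have : cur.toList = L.toList := hcurL.eq_of_length
              (le_antisymm hcurL.length_le h2.1)
            rw [String.toList_inj.mp this]
            exact List.mem_cons_self ..
          · exact List.mem_cons_of_mem _ h'
    · exfalso
      rw [pvCondLast1] at h1
      rw [pvCondLast2] at h2
      rcases hcomp with h | h
      · have := h.length_le
        by_cases hlt : cur.toList.length < f.toList.length
        · exact h1 ⟨hlt, h⟩
        · have heq : cur.toList = f.toList := h.eq_of_length (by omega)
          exact h2 ⟨by omega, heq ▸ List.suffix_refl _⟩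
      · exact h2 ⟨h.length_le, h⟩

lemma pvLoopLast_failure (l : List String) : ∀ (cur : String),
    (∃ a ∈ cur :: l, ∃ b ∈ cur :: l, ¬ a.toList <:+ b.toList ∧ ¬ b.toList <:+ a.toList) →
    pvLoopLast l cur = none := by
  induction l with
  | nil =>
    rintro cur ⟨a, ha, b, hb, hab, _⟩
    have ha' : a = cur := by simpa using ha
    have hb' : b = cur := by simpa using hb
    subst ha'; subst hb'
    exact absurd (List.suffix_refl _) hab
  | cons f fs ih =>
    intro cur hpair
    simp only [pvLoopLast]
    split_ifs with h1 h2
    · rw [pvCondLast1] at h1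
      apply ih f
      apply pvPairTransfer (fun x y => x <:+ y) (fun hxy hyz => hxy.trans hyz)
          (fun hxz hyz => List.suffix_or_suffix_of_suffix hxz hyz)
          (d := cur) (k := f) ?_ (List.mem_cons_self ..) h1.2 hpair
      intro x hx
      rcases List.mem_cons.mp hx with rfl | hx'
      · exact Or.inl rfl
      · exact Or.inr hx'
    · rw [pvCondLast2] at h2
      apply ih cur
      apply pvPairTransfer (fun x y => x <:+ y) (fun hxy hyz => hxy.trans hyz)
          (fun hxz hyz => List.suffix_or_suffix_of_suffix hxz hyz)
          (d := f) (k := cur) ?_ (List.mem_cons_self ..) h2.2 hpair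
      intro x hx
      rcases List.mem_cons.mp hx with rfl | hx'
      · exact Or.inr (List.mem_cons_self ..)
      · rcases List.mem_cons.mp hx' with rfl | hx''
        · exact Or.inl rfl
        · exact Or.inr (List.mem_cons_of_mem _ hx'')
    · rfl

-- maxD with key len is an element and dominates in length
lemma pvMaxD_len {F : List String} (hne : F ≠ []) :
    PySem.List.maxD F PySem.Str.len "" ∈ F ∧
    ∀ y ∈ F, y.toList.length ≤ (PySem.List.maxD F PySem.Str.len "").toList.length := by
  obtain ⟨m, hm⟩ : ∃ m, PySem.List.max? F PySem.Str.len = some m := by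
    cases h : PySem.List.max? F PySem.Str.len with
    | none => exact absurd ((PySem.List.max?_eq_none_iff F _).mp h) hne
    | some m => exact ⟨m, rfl⟩
  have hmd : PySem.List.maxD F PySem.Str.len "" = m := by
    simp [PySem.List.maxD, hm]
  rw [hmd]
  refine ⟨PySem.List.max?_mem hm, ?_⟩
  intro y hy
  have h := PySem.List.max?_isMax hm y hy
  rw [PySem.Str.len_eq, PySem.Str.len_eq] at h
  exact_mod_cast h

-- the first-loop over sorted F agrees with B's max-and-check
lemma pvFirst_eq (F : List String) :
    pvLoopFirst (PySem.List.sorted F (fun x => x)) "" =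
      (if F.all (fun f => PySem.Str.startswith (PySem.List.maxD F PySem.Str.len "") f) then
        some (PySem.List.maxD F PySem.Str.len "") else none) := by
  by_cases hall : ∀ f ∈ F, f.toList <+: (PySem.List.maxD F PySem.Str.len "").toList
  · have hcond : F.all (fun f => PySem.Str.startswith (PySem.List.maxD F PySem.Str.len "") f) = true := by
      rw [List.all_eq_true]
      intro f hf
      rw [PySem.Str.startswith_eq]
      exact (PySem.Chars.startswith_iff _ _).mpr (hall f hf)
    rw [if_pos hcond]
    apply pvLoopFirst_success
    · intro x hx
      rcases List.mem_cons.mp hx with rfl | hx'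
      · simp
      · exact hall x ((PySem.List.mem_sorted _ _ _ _).mp hx')
    · rcases eq_or_ne F [] with rfl | hne
      · have : PySem.List.maxD ([] : List String) PySem.Str.len "" = "" := rfl
        rw [this]
        exact List.mem_cons_self ..
      · exact List.mem_cons_of_mem _
          ((PySem.List.mem_sorted _ _ _ _).mpr (pvMaxD_len hne).1)
  · push_neg at hall
    obtain ⟨f, hf, hnp⟩ := hall
    have hne : F ≠ [] := by rintro rfl; simp at hf
    obtain ⟨hMmem, hMmax⟩ := pvMaxD_len hne
    have hcond : ¬ (F.all (fun f => PySem.Str.startswith (PySem.List.maxD F PySem.Str.len "") f) = true) := by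
      rw [List.all_eq_true]
      intro h
      have := h f hf
      rw [PySem.Str.startswith_eq] at this
      exact hnp ((PySem.Chars.startswith_iff _ _).mp this)
    rw [if_neg hcond]
    apply pvLoopFirst_failure
    refine ⟨f, List.mem_cons_of_mem _ ((PySem.List.mem_sorted _ _ _ _).mpr hf),
            PySem.List.maxD F PySem.Str.len "",
            List.mem_cons_of_mem _ ((PySem.List.mem_sorted _ _ _ _).mpr hMmem), hnp, ?_⟩
    intro hMf
    have h1 := hMf.length_le
    have h2 := hMmax f hf
    have heq : (PySem.List.maxD F PySem.Str.len "").toList = f.toList :=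
      hMf.eq_of_length (le_antisymm h1 h2)
    exact hnp (heq ▸ List.prefix_refl _)

lemma pvLast_eq (F : List String) :
    pvLoopLast (PySem.List.sorted F (fun x => x)) "" =
      (if F.all (fun f => PySem.Str.endswith (PySem.List.maxD F PySem.Str.len "") f) then
        some (PySem.List.maxD F PySem.Str.len "") else none) := by
  by_cases hall : ∀ f ∈ F, f.toList <:+ (PySem.List.maxD F PySem.Str.len "").toList
  · have hcond : F.all (fun f => PySem.Str.endswith (PySem.List.maxD F PySem.Str.len "") f) = true := by
      rw [List.all_eq_true]
      intro f hf
      rw [PySem.Str.endswith_eq]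
      exact (PySem.Chars.endswith_iff _ _).mpr (hall f hf)
    rw [if_pos hcond]
    apply pvLoopLast_success
    · intro x hx
      rcases List.mem_cons.mp hx with rfl | hx'
      · simp
      · exact hall x ((PySem.List.mem_sorted _ _ _ _).mp hx')
    · rcases eq_or_ne F [] with rfl | hne
      · have : PySem.List.maxD ([] : List String) PySem.Str.len "" = "" := rfl
        rw [this]
        exact List.mem_cons_self ..
      · exact List.mem_cons_of_mem _
          ((PySem.List.mem_sorted _ _ _ _).mpr (pvMaxD_len hne).1)
  · push_neg at hall
    obtain ⟨f, hf, hnp⟩ := hall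
    have hne : F ≠ [] := by rintro rfl; simp at hf
    obtain ⟨hMmem, hMmax⟩ := pvMaxD_len hne
    have hcond : ¬ (F.all (fun f => PySem.Str.endswith (PySem.List.maxD F PySem.Str.len "") f) = true) := by
      rw [List.all_eq_true]
      intro h
      have := h f hf
      rw [PySem.Str.endswith_eq] at this
      exact hnp ((PySem.Chars.endswith_iff _ _).mp this)
    rw [if_neg hcond]
    apply pvLoopLast_failure
    refine ⟨f, List.mem_cons_of_mem _ ((PySem.List.mem_sorted _ _ _ _).mpr hf),
            PySem.List.maxD F PySem.Str.len "",
            List.mem_cons_of_mem _ ((PySem.List.mem_sorted _ _ _ _).mpr hMmem), hnp, ?_⟩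
    intro hMf
    have h1 := hMf.length_le
    have h2 := hMmax f hf
    have heq : (PySem.List.maxD F PySem.Str.len "").toList = f.toList :=
      hMf.eq_of_length (le_antisymm h1 h2)
    exact hnp (heq ▸ List.suffix_refl _)

-- ''.join with empty separator flattens
lemma pvJoinEmpty (L : List (List Char)) : PySem.Chars.join [] L = L.flatten := by
  induction L with
  | nil => simp [PySem.Chars.join_nil]
  | cons p rest ih =>
    cases rest with
    | nil => simp [PySem.Chars.join_singleton]
    | cons q r =>
      rw [PySem.Chars.join_cons_cons, ih]
      simp

lemma pvMiddle_eq (patterns : List (List String)) :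
    PySem.Str.join "" (patterns.map (fun p => PySem.Str.join "" (PySem.List.slice p (some 1) (some (-1))))) =
    PySem.Str.join "" (patterns.flatMap (fun p => PySem.List.slice p (some 1) (some (-1)))) := by
  apply String.toList_inj.mp
  rw [PySem.Str.toList_join, PySem.Str.toList_join]
  have h0 : ("" : String).toList = [] := rfl
  rw [h0, pvJoinEmpty, pvJoinEmpty]
  induction patterns with
  | nil => simp
  | cons p ps ih =>
    simp only [List.map_cons, List.flatMap_cons, List.map_append, List.flatten_cons,
      List.flatten_append, PySem.Str.toList_join, ih]
    rw [h0, pvJoinEmpty]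

-- ===== VERDICT (by name: the statement is the Claim_ definition above) =====
theorem pattern_matching_spec : Claim_equal_pattern_matching := by
  intro patterns _ _
  unfold Spec_pattern_matching pattern_matching pattern_matching_alt
  simp only [pvFirst_eq, pvLast_eq, pvMiddle_eq]
  by_cases h1 : ((List.map (fun p => PySem.List.pyGetD p 0 "") patterns).all
      (fun f => PySem.Str.startswith (PySem.List.maxD (List.map (fun p => PySem.List.pyGetD p 0 "") patterns) PySem.Str.len "") f)) = true
  · by_cases h2 : ((List.map (fun p => PySem.List.pyGetD p (-1) "") patterns).all
        (fun f => PySem.Str.endswith (PySem.List.maxD (List.map (fun p => PySem.List.pyGetD p (-1) "") patterns) PySem.Str.len "") f)) = true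
    · rw [if_pos h1, if_pos h2, if_neg (not_not_intro h1), if_neg (not_not_intro h2)]
    · rw [if_pos h1, if_neg h2, if_neg (not_not_intro h1), if_pos h2]
  · rw [if_neg h1, if_pos h1]
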